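-- pv_equiv track=rewrite | github.com/marsdev26/python_exercices | testW.py | check_rlud
-- ===== SOURCE A (Python) =====
-- def word_in_list(word, word_list, results):
--     if word in word_list:
--         if word not in results:
--             results[word] = 1
--             return True
--         else:
--             results[word] += 1
--             return True
--     else:
--         return False
--
-- def check_rlud(word_list, matrix):
--     test_word = ''
--     results = {}
--     for row in matrix:
--         for i in range(len(row)):
--             for j in range(i, len(row)):
--                 test_word += row[j]
--                 if word_in_list(test_word, word_list, results):
--                     continue
--             test_word = ""
--
--     return results
-- ===== SOURCE B (Python) =====
-- def check_rlud(word_list, matrix):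
--     words = set(word_list)
--     counts = {}
--     for row in matrix:
--         n = len(row)
--         for i in range(n):
--             for j in range(i + 1, n + 1):
--                 sub = row[i:j]
--                 counts[sub] = counts.get(sub, 0) + 1
--     out = {}
--     for sub, c in counts.items():
--         if sub in words:
--             out[sub] = c
--     return out
-- ===== Notes on version B (the rewrite author's own statement) =====
-- stated objective: faster
-- what changed: B counts every contiguous substring once into a plain counter dict built with slices and get(), then filters that counter against a set of the words in a final pass, instead of A's on-the-fly scheme of growing the test word character by character and, for each candidate, scanning the word list and branching between first-insert and increment inside a helper that mutates the dict.
import Mathlib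
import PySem

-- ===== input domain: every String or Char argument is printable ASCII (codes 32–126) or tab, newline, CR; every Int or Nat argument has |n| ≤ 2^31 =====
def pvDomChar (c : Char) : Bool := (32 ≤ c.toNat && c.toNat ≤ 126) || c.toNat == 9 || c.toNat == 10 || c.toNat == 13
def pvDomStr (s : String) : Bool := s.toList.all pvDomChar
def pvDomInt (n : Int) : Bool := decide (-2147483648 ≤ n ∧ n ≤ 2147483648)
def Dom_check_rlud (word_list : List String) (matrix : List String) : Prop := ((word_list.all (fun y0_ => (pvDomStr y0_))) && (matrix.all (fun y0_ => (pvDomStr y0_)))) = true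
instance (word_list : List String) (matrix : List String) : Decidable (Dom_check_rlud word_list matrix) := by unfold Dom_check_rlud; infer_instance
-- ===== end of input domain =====

-- B counts every contiguous substring once into a counter dict and filters it against a set of the
-- words in a final pass, replacing A's per-substring linear scan of the word list (and its
-- insert/increment branching) with one hash lookup (objective: faster, measured).

-- ===== PORT A =====
-- Python helper word_in_list: mutates results; ported as returning (bool, updated results).
-- 'results[word] += 1' is ported as insert word (getD word 0 + 1): the branch guarantees the key
-- is present, so the getD default 0 is never the value read.
def word_in_list (word : String) (word_list : List String) (results : PySem.Dict String Int) :
    Bool × PySem.Dict String Int :=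
  if word_list.contains word then
    if results.contains word = false then
      (true, results.insert word 1)
    else
      (true, results.insert word (results.getD word 0 + 1))
  else
    (false, results)

-- the j-loop body: test_word += row[j]; word_in_list(test_word, word_list, results).
-- test_word is kept as a List Char (PySem strings live on List Char); the dict key is
-- String.ofList of it.  j always lies in range(i, len(row)), so the .getD ' ' default of the
-- (otherwise exact) row[j] index is never used.
def pvAJ (word_list : List String) (row : String)
    (st : List Char × PySem.Dict String Int) (j : Int) : List Char × PySem.Dict String Int :=
  let test_word := st.1 ++ [(PySem.Str.pyGet? row j).getD ' ']
  let r := word_in_list (String.ofList test_word) word_list st.2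
  (test_word, r.2)

-- the i-loop body: run the j-loop, then test_word = ""
def pvAI (word_list : List String) (row : String)
    (st : List Char × PySem.Dict String Int) (i : Int) : List Char × PySem.Dict String Int :=
  let st' := (PySem.List.pyRange i (PySem.Str.len row) 1).foldl (pvAJ word_list row) st
  ([], st'.2)

-- the row loop body
def pvARow (word_list : List String) (st : List Char × PySem.Dict String Int) (row : String) :
    List Char × PySem.Dict String Int :=
  (PySem.List.pyRange 0 (PySem.Str.len row) 1).foldl (pvAI word_list row) st

def check_rlud (word_list : List String) (matrix : List String) : List (String × Int) :=
  (matrix.foldl (pvARow word_list) ([], PySem.Dict.empty)).2.items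

-- ===== PORT B =====
-- counts[sub] = counts.get(sub, 0) + 1  for sub = row[i:j]
def pvBJ (row : String) (i : Int) (counts : PySem.Dict String Int) (j : Int) :
    PySem.Dict String Int :=
  let sub := PySem.Str.slice row (some i) (some j)
  counts.insert sub (counts.getD sub 0 + 1)

def pvBI (row : String) (counts : PySem.Dict String Int) (i : Int) : PySem.Dict String Int :=
  (PySem.List.pyRange (i + 1) (PySem.Str.len row + 1) 1).foldl (pvBJ row i) counts

def pvBRow (counts : PySem.Dict String Int) (row : String) : PySem.Dict String Int :=
  (PySem.List.pyRange 0 (PySem.Str.len row) 1).foldl (pvBI row) counts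

-- final pass: out[sub] = c for the subs that are words
def pvBOut (words : PySem.Set String) (out : PySem.Dict String Int) (p : String × Int) :
    PySem.Dict String Int :=
  if PySem.Set.contains words p.1 then out.insert p.1 p.2 else out

def check_rlud_alt (word_list : List String) (matrix : List String) : List (String × Int) :=
  let words := PySem.Set.ofList word_list
  let counts := matrix.foldl pvBRow PySem.Dict.empty
  (counts.items.foldl (pvBOut words) PySem.Dict.empty).items

-- ===== PRECONDITION & SPEC =====
def Spec_check_rlud (word_list : List String) (matrix : List String) (out : List (String × Int)) : Prop := out = check_rlud_alt word_list matrix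
instance (word_list : List String) (matrix : List String) (out : List (String × Int)) : Decidable (Spec_check_rlud word_list matrix out) := by unfold Spec_check_rlud; infer_instance

-- ===== CLAIM (what is proved, stated in full; the proofs are below) =====
def Claim_equal_check_rlud : Prop := ∀ (word_list : List String) (matrix : List String), Dom_check_rlud word_list matrix → Spec_check_rlud word_list matrix (check_rlud word_list matrix)

-- ===== LEMMAS AND PROOFS =====
-- abstract step of A: feed one candidate substring to word_in_list
def pvStepA (word_list : List String) (r : PySem.Dict String Int) (t : List Char) :
    PySem.Dict String Int :=
  (word_in_list (String.ofList t) word_list r).2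

-- abstract step of B: count one substring
def pvStepB (cnt : PySem.Dict String Int) (t : List Char) : PySem.Dict String Int :=
  let s := String.ofList t
  cnt.insert s (cnt.getD s 0 + 1)

-- keep only the entries whose key is a word
def pvFilt (word_list : List String) (l : List (String × Int)) : List (String × Int) :=
  l.filter (fun p => word_list.contains p.1)

def pvFiltD (word_list : List String) (d : PySem.Dict String Int) : PySem.Dict String Int :=
  PySem.Dict.mk (pvFilt word_list d.items)

-- the substrings starting at position i of a row, in A's (and B's) order
def pvISubs (cs : List Char) (i : Nat) : List (List Char) :=
  (List.range (cs.length - i)).map (fun k => (cs.drop i).take (k + 1))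

def pvRowSubs (cs : List Char) : List (List Char) :=
  (List.range cs.length).flatMap (pvISubs cs)

def pvAllSubs (matrix : List String) : List (List Char) :=
  matrix.flatMap (fun row => pvRowSubs row.toList)

lemma pv_setc (word_list : List String) (s : String) :
    PySem.Set.contains (PySem.Set.ofList word_list) s = word_list.contains s := by
  by_cases h : s ∈ word_list
  · have h1 : PySem.Set.contains (PySem.Set.ofList word_list) s = true :=
      (PySem.Set.contains_iff _ _).mpr ((PySem.Set.mem_ofList _ _).mpr h)
    rw [h1]
    symm
    simpa using h
  · have h1 : PySem.Set.contains (PySem.Set.ofList word_list) s = false := by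
      rcases Bool.eq_false_or_eq_true (PySem.Set.contains (PySem.Set.ofList word_list) s) with hh | hh
      · exact absurd ((PySem.Set.mem_ofList _ _).mp ((PySem.Set.contains_iff _ _).mp hh)) h
      · exact hh
    rw [h1]
    symm
    simpa using h

lemma pv_get?_filt (word_list : List String) (s : String)
    (hw : word_list.contains s = true) (l : List (String × Int)) :
    (PySem.Dict.mk (pvFilt word_list l)).get? s = (PySem.Dict.mk l).get? s := by
  induction l with
  | nil => rfl
  | cons p l ih =>
    obtain ⟨k, v⟩ := p
    by_cases hk : (k == s) = true
    · have hks : k = s := eq_of_beq hk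
      have hwk : word_list.contains k = true := by rw [hks]; exact hw
      simp only [pvFilt, List.filter_cons, hwk, if_true, PySem.Dict.get?_mk_cons, hk]
    · simp only [pvFilt, List.filter_cons] at ih ⊢
      by_cases hwk : word_list.contains k = true
      · simp only [hwk, if_true, PySem.Dict.get?_mk_cons, hk, Bool.false_eq_true, if_false]
        exact ih
      · simp only [Bool.not_eq_true] at hwk
        simp only [hwk, Bool.false_eq_true, if_false, PySem.Dict.get?_mk_cons, hk]
        exact ih

lemma pv_contains_filt (word_list : List String) (s : String)
    (hw : word_list.contains s = true) (l : List (String × Int)) :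
    (PySem.Dict.mk (pvFilt word_list l)).contains s = (PySem.Dict.mk l).contains s := by
  rw [PySem.Dict.contains_mk, PySem.Dict.contains_mk, pvFilt, List.any_filter]
  apply PySem.List.any_congr_mem
  intro p _
  by_cases hk : (p.1 == s) = true
  · have hmem : p.1 ∈ word_list := by
      have h2 : word_list.contains p.1 = true := by rw [eq_of_beq hk]; exact hw
      simpa using h2
    simp [hmem, hk]
  · simp [hk]

lemma pv_filt_map_repl_pos (word_list : List String) (s : String) (v : Int)
    (hw : word_list.contains s = true) (l : List (String × Int)) :
    pvFilt word_list (l.map (fun p => if p.1 == s then (s, v) else p)) =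
      (pvFilt word_list l).map (fun p => if p.1 == s then (s, v) else p) := by
  induction l with
  | nil => rfl
  | cons p l ih =>
    obtain ⟨k, v'⟩ := p
    by_cases hk : (k == s) = true
    · have hwk : word_list.contains k = true := by rw [eq_of_beq hk]; exact hw
      simp only [pvFilt, List.map_cons, List.filter_cons, hk, if_true, hwk, hw] at ih ⊢
      simp only [ih]
    · simp only [pvFilt, List.map_cons, List.filter_cons, hk, Bool.false_eq_true, if_false] at ih ⊢
      by_cases hwk : word_list.contains k = true
      · simp only [hwk, if_true, List.map_cons, hk, Bool.false_eq_true, if_false, ih]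
      · simp only [Bool.not_eq_true] at hwk
        simp only [hwk, Bool.false_eq_true, if_false, ih]

lemma pv_filt_map_repl_neg (word_list : List String) (s : String) (v : Int)
    (hw : word_list.contains s = false) (l : List (String × Int)) :
    pvFilt word_list (l.map (fun p => if p.1 == s then (s, v) else p)) = pvFilt word_list l := by
  induction l with
  | nil => rfl
  | cons p l ih =>
    obtain ⟨k, v'⟩ := p
    by_cases hk : (k == s) = true
    · have hwk : word_list.contains k = false := by rw [eq_of_beq hk]; exact hw
      simp only [pvFilt, List.map_cons, List.filter_cons, hk, if_true, hwk, hw,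
        Bool.false_eq_true, if_false] at ih ⊢
      exact ih
    · simp only [pvFilt, List.map_cons, List.filter_cons, hk, Bool.false_eq_true, if_false] at ih ⊢
      by_cases hwk : word_list.contains k = true
      · simp only [hwk, if_true, ih]
      · simp only [Bool.not_eq_true] at hwk
        simp only [hwk, Bool.false_eq_true, if_false, ih]

-- one lockstep step: A's update of the filtered dict is the filter of B's update
lemma pv_step_comm (word_list : List String) (cnt : PySem.Dict String Int) (t : List Char) :
    pvStepA word_list (pvFiltD word_list cnt) t = pvFiltD word_list (pvStepB cnt t) := by
  obtain ⟨l⟩ := cnt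
  simp only [pvStepA, pvStepB, pvFiltD, word_in_list]
  set s := String.ofList t with hs
  by_cases hw : word_list.contains s = true
  · have hcf := pv_contains_filt word_list s hw l
    by_cases hc : (PySem.Dict.mk l).contains s = true
    · have hg : (PySem.Dict.mk (pvFilt word_list l)).getD s 0 = (PySem.Dict.mk l).getD s 0 := by
        rw [PySem.Dict.getD_eq_get?_getD, PySem.Dict.getD_eq_get?_getD,
          pv_get?_filt word_list s hw l]
      have hcf' : (PySem.Dict.mk (pvFilt word_list l)).contains s = true := by rw [hcf]; exact hc
      simp only [hw, if_true, hcf', Bool.true_eq_false, if_false]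
      apply PySem.Dict.ext
      rw [PySem.Dict.items_insert_of_contains _ _ hcf', hg]
      show _ = pvFilt word_list ((PySem.Dict.mk l).insert s ((PySem.Dict.mk l).getD s 0 + 1)).items
      rw [PySem.Dict.items_insert_of_contains _ _ hc]
      exact (pv_filt_map_repl_pos word_list s _ hw _).symm
    · simp only [Bool.not_eq_true] at hc
      have hc' : (PySem.Dict.mk l).contains s = false := hc
      have hcf' : (PySem.Dict.mk (pvFilt word_list l)).contains s = false := by rw [hcf]; exact hc'
      simp only [hw, if_true, hcf', if_true]
      apply PySem.Dict.ext
      rw [PySem.Dict.items_insert_of_not_contains _ _ hcf']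
      show pvFilt word_list l ++ [(s, 1)] =
        pvFilt word_list ((PySem.Dict.mk l).insert s ((PySem.Dict.mk l).getD s 0 + 1)).items
      rw [PySem.Dict.items_insert_of_not_contains _ _ hc', PySem.Dict.getD_of_not_contains _ _ hc']
      show pvFilt word_list l ++ [(s, 1)] = pvFilt word_list (l ++ [(s, 0 + 1)])
      simp only [pvFilt, List.filter_append, List.filter_cons, List.filter_nil, hw, if_true]
      norm_num
  · simp only [Bool.not_eq_true] at hw
    have hw' : word_list.contains s = false := hw
    simp only [hw', Bool.false_eq_true, if_false]
    by_cases hc : (PySem.Dict.mk l).contains s = true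
    · apply PySem.Dict.ext
      show pvFilt word_list l =
        pvFilt word_list ((PySem.Dict.mk l).insert s ((PySem.Dict.mk l).getD s 0 + 1)).items
      rw [PySem.Dict.items_insert_of_contains _ _ hc]
      exact (pv_filt_map_repl_neg word_list s _ hw' _).symm
    · simp only [Bool.not_eq_true] at hc
      have hc' : (PySem.Dict.mk l).contains s = false := hc
      apply PySem.Dict.ext
      show pvFilt word_list l =
        pvFilt word_list ((PySem.Dict.mk l).insert s ((PySem.Dict.mk l).getD s 0 + 1)).items
      rw [PySem.Dict.items_insert_of_not_contains _ _ hc']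
      show pvFilt word_list l = pvFilt word_list (l ++ [(s, (PySem.Dict.mk l).getD s 0 + 1)])
      simp only [pvFilt, List.filter_append, List.filter_cons, List.filter_nil, hw',
        Bool.false_eq_true, if_false]
      simp

lemma pv_lock (word_list : List String) (ts : List (List Char)) (cnt : PySem.Dict String Int) :
    ts.foldl (pvStepA word_list) (pvFiltD word_list cnt) =
      pvFiltD word_list (ts.foldl pvStepB cnt) := by
  induction ts generalizing cnt with
  | nil => rfl
  | cons t ts ih =>
    simp only [List.foldl_cons]
    rw [pv_step_comm]
    exact ih _

-- a fold whose first component is re-set to [] each step is a fold on the second component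
lemma pv_fold_pair {α : Type} (l : List α)
    (G : List Char × PySem.Dict String Int → α → List Char × PySem.Dict String Int)
    (F : PySem.Dict String Int → α → PySem.Dict String Int)
    (h : ∀ (r : PySem.Dict String Int), ∀ x ∈ l, G ([], r) x = ([], F r x))
    (r : PySem.Dict String Int) :
    l.foldl G ([], r) = ([], l.foldl F r) := by
  induction l generalizing r with
  | nil => rfl
  | cons x l ih =>
    simp only [List.foldl_cons]
    rw [h r x (List.mem_cons_self ..)]
    exact ih (fun r' y hy => h r' y (List.mem_cons_of_mem _ hy)) _

lemma pv_jA (word_list : List String) (row : String) (i m : Nat)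
    (him : i + m ≤ row.toList.length) (r : PySem.Dict String Int) :
    (List.range m).foldl (fun st (k : Nat) => pvAJ word_list row st ((i : Int) + (k : Int))) ([], r) =
      ((row.toList.drop i).take m,
        ((List.range m).map (fun k => (row.toList.drop i).take (k + 1))).foldl
          (pvStepA word_list) r) := by
  induction m with
  | zero => simp
  | succ m ih =>
    rw [List.range_succ]
    simp only [List.foldl_append, List.map_append, List.foldl_cons, List.foldl_nil,
      List.map_cons, List.map_nil]
    rw [ih (by omega)]
    have hidx : ((i : Int) + (m : Int)) = ((i + m : Nat) : Int) := by push_cast; ring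
    have him' : i + m < row.toList.length := by omega
    have hm : m < (row.toList.drop i).length := by
      rw [List.length_drop]; omega
    have htake : (row.toList.drop i).take m ++ [row.toList[i + m]] =
        (row.toList.drop i).take (m + 1) := by
      rw [List.take_add_one, List.getElem?_eq_getElem hm, List.getElem_drop]
      rfl
    simp only [pvAJ, hidx, PySem.Str.pyGet?_natCast, List.getElem?_eq_getElem him',
      Option.getD_some, htake]
    rfl

lemma pv_iA (word_list : List String) (row : String) (i : Nat) (hi : i < row.toList.length)
    (r : PySem.Dict String Int) :
    pvAI word_list row ([], r) (i : Int) =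
      ([], (pvISubs row.toList i).foldl (pvStepA word_list) r) := by
  simp only [pvAI, PySem.Str.len_eq, PySem.List.pyRange_one]
  have h1 : (((row.toList.length : Int)) - (i : Int)).toNat = row.toList.length - i := by omega
  rw [h1, List.foldl_map, pv_jA word_list row i (row.toList.length - i) (by omega) r]
  rfl

lemma pv_rowA (word_list : List String) (row : String) (r : PySem.Dict String Int) :
    pvARow word_list ([], r) row = ([], (pvRowSubs row.toList).foldl (pvStepA word_list) r) := by
  simp only [pvARow, PySem.Str.len_eq, PySem.List.pyRange_one]
  have h1 : ((row.toList.length : Int) - 0).toNat = row.toList.length := by omega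
  rw [h1, List.foldl_map, pvRowSubs, List.foldl_flatMap]
  apply pv_fold_pair
  intro r' x hx
  have hx' : x < row.toList.length := List.mem_range.mp hx
  rw [zero_add]
  exact pv_iA word_list row x hx' r'

lemma pv_matA (word_list : List String) (matrix : List String) (r : PySem.Dict String Int) :
    matrix.foldl (pvARow word_list) ([], r) =
      ([], (pvAllSubs matrix).foldl (pvStepA word_list) r) := by
  rw [pvAllSubs, List.foldl_flatMap]
  apply pv_fold_pair
  intro r' row _
  exact pv_rowA word_list row r'

lemma pv_iB (row : String) (i : Nat) (c : PySem.Dict String Int) :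
    pvBI row c (i : Int) = (pvISubs row.toList i).foldl pvStepB c := by
  simp only [pvBI, PySem.Str.len_eq, PySem.List.pyRange_one]
  have h1 : (((row.toList.length : Int) + 1) - ((i : Int) + 1)).toNat =
      row.toList.length - i := by omega
  rw [h1, List.foldl_map, pvISubs, List.foldl_map]
  apply PySem.List.foldl_congr_mem
  intro acc k _
  have hsub : PySem.Str.slice row (some (i : Int)) (some ((i : Int) + 1 + (k : Int))) =
      String.ofList ((row.toList.drop i).take (k + 1)) := by
    apply String.toList_injective
    rw [PySem.Str.toList_slice]
    have hcast : ((i : Int) + 1 + (k : Int)) = ((i : Int) + ((k + 1 : Nat) : Int)) := by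
      push_cast; ring
    simp only [PySem.Chars.slice_eq_listSlice, hcast, PySem.List.slice_natCast_add]
    simp
  simp only [pvBJ, hsub, pvStepB]

lemma pv_rowB (row : String) (c : PySem.Dict String Int) :
    pvBRow c row = (pvRowSubs row.toList).foldl pvStepB c := by
  simp only [pvBRow, PySem.Str.len_eq, PySem.List.pyRange_one]
  have h1 : ((row.toList.length : Int) - 0).toNat = row.toList.length := by omega
  rw [h1, List.foldl_map, pvRowSubs, List.foldl_flatMap]
  apply PySem.List.foldl_congr_mem
  intro acc x _
  rw [zero_add]
  exact pv_iB row x acc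

lemma pv_matB (matrix : List String) (c : PySem.Dict String Int) :
    matrix.foldl pvBRow c = (pvAllSubs matrix).foldl pvStepB c := by
  rw [pvAllSubs, List.foldl_flatMap]
  apply PySem.List.foldl_congr_mem
  intro acc row _
  exact pv_rowB row acc

lemma pv_outB (word_list : List String) (l : List (String × Int)) (d : PySem.Dict String Int)
    (hd : ∀ p ∈ l, d.contains p.1 = false) (hn : (l.map (fun p => p.1)).Nodup) :
    (l.foldl (pvBOut (PySem.Set.ofList word_list)) d).items = d.items ++ pvFilt word_list l := by
  induction l generalizing d with
  | nil => simp [pvFilt]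
  | cons p l ih =>
    obtain ⟨k, v⟩ := p
    simp only [List.map_cons, List.nodup_cons] at hn
    simp only [List.foldl_cons, pvBOut, pv_setc]
    by_cases hw : word_list.contains k = true
    · simp only [hw, if_true]
      have hdk : d.contains k = false := hd (k, v) (List.mem_cons_self ..)
      rw [ih (d.insert k v) ?_ hn.2]
      · rw [PySem.Dict.items_insert_of_not_contains _ _ hdk]
        simp only [pvFilt, List.filter_cons, hw, if_true, List.append_assoc,
          List.singleton_append]
      · intro q hq
        have hne : (q.1 == k) = false := by
          rcases Bool.eq_false_or_eq_true (q.1 == k) with hh | hh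
          · exact absurd (eq_of_beq hh ▸ List.mem_map_of_mem hq) hn.1
          · exact hh
        rw [PySem.Dict.contains_insert, hne, hd q (List.mem_cons_of_mem _ hq)]
        rfl
    · simp only [Bool.not_eq_true] at hw
      have hw' : word_list.contains k = false := hw
      simp only [hw', Bool.false_eq_true, if_false]
      rw [ih d (fun q hq => hd q (List.mem_cons_of_mem _ hq)) hn.2]
      simp only [pvFilt, List.filter_cons, hw', Bool.false_eq_true, if_false]

lemma pv_counts_nodup (matrix : List String) :
    ((pvAllSubs matrix).foldl pvStepB PySem.Dict.empty).keys.Nodup := by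
  exact PySem.Dict.nodup_keys_foldl_insert_key _ String.ofList
    (fun d x => d.getD (String.ofList x) 0 + 1) _ PySem.Dict.nodup_keys_empty

-- ===== VERDICT (by name: the statement is the Claim_ definition above) =====
theorem check_rlud_spec : Claim_equal_check_rlud := by
  intro word_list matrix _
  show check_rlud word_list matrix = check_rlud_alt word_list matrix
  rw [check_rlud, check_rlud_alt, pv_matA, pv_matB]
  have hE : pvFiltD word_list PySem.Dict.empty = PySem.Dict.empty := rfl
  show ((pvAllSubs matrix).foldl (pvStepA word_list) PySem.Dict.empty).items = _
  conv_lhs => rw [← hE, pv_lock]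
  rw [pv_outB word_list _ PySem.Dict.empty
    (fun p _ => PySem.Dict.contains_empty _) (pv_counts_nodup matrix)]
  rfl
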